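-- pv_equiv track=rewrite | github.com/DanielTLouis/HackerRank | Algorithms/Prepare_Algorithms_Strings_AlternatingCharacters.py | alternatingCharacters
-- ===== SOURCE A (Python) =====
-- def alternatingCharacters(s):
--     # Write your code here
--     count = 0
--     for i in range(0, len(s)-1):
--         if(s[i] == s[i+1]):
--             s[:i:]#Slice out the one character
--             i = 0
--             count += 1
--     return count
-- ===== SOURCE B (Python) =====
-- def alternatingCharacters(s):
--     # Group-skipping (groupby style): walk from run start to run start,
--     # counting the maximal runs of identical characters; the deletions
--     # needed are len(s) minus the number of runs.
--     n = len(s)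
--     groups = 0
--     i = 0
--     while i < n:
--         groups += 1
--         ch = s[i]
--         i += 1
--         while i < n and s[i] == ch:
--             i += 1
--     return n - groups
-- ===== Notes on version B (the rewrite author's own statement) =====
-- stated objective: faster
-- what changed: Replaces A's per-index adjacent-pair comparison loop (with a dead prefix slice per duplicate) by a groupby-style run-skipping traversal: an outer loop jumps from run start to run start counting maximal runs of the run-head character, and returns len(s) minus the run count.
import Mathlib
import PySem

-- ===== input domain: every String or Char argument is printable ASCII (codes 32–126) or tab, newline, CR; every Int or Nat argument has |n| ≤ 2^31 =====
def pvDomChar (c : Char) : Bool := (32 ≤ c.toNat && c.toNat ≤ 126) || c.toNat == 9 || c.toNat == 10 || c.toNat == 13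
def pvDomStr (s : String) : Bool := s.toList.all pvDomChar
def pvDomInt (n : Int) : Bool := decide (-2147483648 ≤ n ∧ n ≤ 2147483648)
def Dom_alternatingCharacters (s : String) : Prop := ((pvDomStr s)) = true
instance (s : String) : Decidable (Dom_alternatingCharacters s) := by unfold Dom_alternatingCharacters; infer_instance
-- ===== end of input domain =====

-- B replaces A's per-index adjacent-pair loop (with its dead prefix slice per duplicate)
-- by a groupby-style run-skipping traversal returning len(s) minus the number of maximal
-- runs (objective: faster — A copies a prefix per duplicate found, B is one linear walk).

-- ===== PORT A =====
-- count = 0; for i in range(0, len(s)-1): if s[i]==s[i+1]: s[:i:]; i = 0; count += 1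
-- (the slice and the rebinding of i are dead in Python too; the index reads s[i],
--  s[i+1] are ported with pyGetD, exact since the indices are always in range here)
def alternatingCharacters (s : String) : Int :=
  (PySem.List.pyRange 0 (PySem.Str.len s - 1) 1).foldl
    (fun count i =>
      if PySem.List.pyGetD s.toList i ' ' == PySem.List.pyGetD s.toList (i + 1) ' ' then
        let _ := PySem.List.slice s.toList none (some i)  -- dead s[:i:]
        count + 1
      else count) 0

-- ===== PORT B =====
-- Outer while of Source B: at a run start take the run head ch, the inner while skips all
-- following characters equal to ch (List.dropWhile), count one group, continue.
def pvRunSkip : List Char → Int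
  | [] => 0
  | c :: t => 1 + pvRunSkip (t.dropWhile (· == c))
termination_by l => l.length
decreasing_by
  exact Nat.lt_succ_of_le (List.length_dropWhile_le _ _)

-- return n - groups
def alternatingCharacters_alt (s : String) : Int :=
  PySem.Str.len s - pvRunSkip s.toList

-- ===== PRECONDITION & SPEC =====
def Spec_alternatingCharacters (s : String) (out : Int) : Prop := out = alternatingCharacters_alt s
instance (s : String) (out : Int) : Decidable (Spec_alternatingCharacters s out) := by unfold Spec_alternatingCharacters; infer_instance

-- ===== CLAIM (what is proved, stated in full; the proofs are below) =====
def Claim_equal_alternatingCharacters : Prop := ∀ (s : String), Dom_alternatingCharacters s → Spec_alternatingCharacters s (alternatingCharacters s)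

-- ===== LEMMAS AND PROOFS =====

-- number of adjacent equal pairs, structurally (characterises A's result)
def pairCount : List Char → Int
  | [] => 0
  | [_] => 0
  | a :: b :: t => (if a == b then 1 else 0) + pairCount (b :: t)

lemma countAux (d : Char) : ∀ l : List Char,
    ((List.range (l.length - 1)).countP
      (fun k => l.getD k d == l.getD (k + 1) d) : Int) = pairCount l := by
  intro l
  induction l with
  | nil => simp [pairCount]
  | cons a t ih =>
    cases t with
    | nil => simp [pairCount]
    | cons b t' =>
      have hlen : (a :: b :: t').length - 1 = (b :: t').length - 1 + 1 := by simp
      rw [hlen, List.range_succ_eq_map, List.countP_cons, List.countP_map]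
      have hsh : ((List.range ((b :: t').length - 1)).countP
          ((fun k => (a :: b :: t').getD k d == (a :: b :: t').getD (k + 1) d) ∘ Nat.succ))
          = (List.range ((b :: t').length - 1)).countP
            (fun k => (b :: t').getD k d == (b :: t').getD (k + 1) d) := by
        apply List.countP_congr
        intro k _
        simp [Function.comp, List.getD]
      rw [hsh, pairCount]
      by_cases hab : a == b <;> simp [hab, List.getD] at * <;> omega

-- one run: the pairs inside c's leading run, then the rest
lemma pair_run : ∀ (t : List Char) (c : Char),
    pairCount (c :: t) =
      ((t.takeWhile (· == c)).length : Int) + pairCount (t.dropWhile (· == c)) := by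
  intro t
  induction t with
  | nil => intro c; simp [pairCount]
  | cons x t' ih =>
    intro c
    by_cases hx : x = c
    · subst hx
      rw [pairCount]
      simp only [List.takeWhile_cons, List.dropWhile_cons, beq_self_eq_true, if_true]
      rw [ih x]
      simp
      ring
    · have hbx : (x == c) = false := by simp [hx]
      rw [pairCount]
      simp [hbx]
      intro h
      exact absurd h.symm hx

lemma pair_runSkip : ∀ (l : List Char),
    pairCount l = (l.length : Int) - pvRunSkip l := by
  intro l
  induction hn : l.length using Nat.strong_induction_on generalizing l with
  | _ n ih =>
    cases l with
    | nil =>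
        subst hn
        simp [pairCount, pvRunSkip]
    | cons c t =>
      have hdrop : (t.dropWhile (· == c)).length < n := by
        subst hn
        exact Nat.lt_succ_of_le (List.length_dropWhile_le _ _)
      have hrec := ih _ hdrop (t.dropWhile (· == c)) rfl
      rw [pair_run t c, hrec, pvRunSkip]
      have hsum : (t.takeWhile (· == c)).length + (t.dropWhile (· == c)).length
          = t.length := by
        rw [← List.length_append, List.takeWhile_append_dropWhile]
      subst hn
      simp only [List.length_cons]
      push_cast
      omega

-- ===== VERDICT (by name: the statement is the Claim_ definition above) =====
theorem alternatingCharacters_spec : Claim_equal_alternatingCharacters := by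
  intro s _
  unfold Spec_alternatingCharacters alternatingCharacters alternatingCharacters_alt
  have hA : (PySem.List.pyRange 0 (PySem.Str.len s - 1) 1).foldl
      (fun count i =>
        if PySem.List.pyGetD s.toList i ' ' == PySem.List.pyGetD s.toList (i + 1) ' ' then
          let _ := PySem.List.slice s.toList none (some i)
          count + 1
        else count) 0 = pairCount s.toList := by
    rw [PySem.List.pyRange_one, List.foldl_map]
    have hlen : ((PySem.Str.len s - 1) - 0).toNat = s.toList.length - 1 := by
      rw [PySem.Str.len_eq]; omega
    rw [hlen]
    trans (List.range (s.toList.length - 1)).foldl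
      (fun (count : Int) (k : Nat) =>
        if s.toList.getD k ' ' == s.toList.getD (k + 1) ' ' then count + 1 else count) 0
    · apply PySem.List.foldl_congr_mem
      intro acc k _
      have h2 : ((k : Int)) + 1 = (((k + 1 : Nat) : Nat) : Int) := by push_cast; ring
      rw [zero_add, h2, PySem.List.pyGetD_natCast, PySem.List.pyGetD_natCast]
    · rw [PySem.List.foldl_if_add_one, countAux]
      ring
  rw [hA, pair_runSkip s.toList, PySem.Str.len_eq]
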